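-- pv_equiv track=rewrite | github.com/xinyu-dev/NeMo-Skills | nemo_skills/mcp/clients.py | _filter_tools
-- ===== SOURCE A (Python) =====
-- def _filter_tools(result, disabled_tools, enabled_tools):
--     if not isinstance(result, list):
--         return result
--     disabled_set = set(disabled_tools or [])
--     enabled_set = set(enabled_tools or [])
--
--     filtered = []
--     names_seen = set()
--     for entry in result:
--         name = entry.get("name")
--         if name is None:
--             continue
--         names_seen.add(name)
--         if name in disabled_set:
--             continue
--         if enabled_set and name not in enabled_set:
--             continue
--         filtered.append(entry)
--
--     if enabled_set:
--         missing = enabled_set - names_seen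
--         if missing:
--             raise ValueError(f"Enabled tools not found: {sorted(missing)}")
--
--     return filtered
-- ===== SOURCE B (Python) =====
-- def _filter_tools(result, disabled_tools, enabled_tools):
--     if not isinstance(result, list):
--         return result
--     names_seen = {e.get("name") for e in result} - {None}
--     enabled_set = set(enabled_tools or [])
--     if enabled_set:
--         missing = enabled_set - names_seen
--         if missing:
--             raise ValueError(f"Enabled tools not found: {sorted(missing)}")
--     allowed = (enabled_set or names_seen) - set(disabled_tools or [])
--     return [e for e in result if e.get("name") in allowed]
-- ===== Notes on version B (the rewrite author's own statement) =====
-- stated objective: alternative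
-- what changed: Replaces A's stateful loop and per-entry three-condition branch chain with set algebra: compute one 'allowed' name set ((enabled_set or names_seen) - disabled_set) after up-front validation, then filter by a single membership test.
import Mathlib
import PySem

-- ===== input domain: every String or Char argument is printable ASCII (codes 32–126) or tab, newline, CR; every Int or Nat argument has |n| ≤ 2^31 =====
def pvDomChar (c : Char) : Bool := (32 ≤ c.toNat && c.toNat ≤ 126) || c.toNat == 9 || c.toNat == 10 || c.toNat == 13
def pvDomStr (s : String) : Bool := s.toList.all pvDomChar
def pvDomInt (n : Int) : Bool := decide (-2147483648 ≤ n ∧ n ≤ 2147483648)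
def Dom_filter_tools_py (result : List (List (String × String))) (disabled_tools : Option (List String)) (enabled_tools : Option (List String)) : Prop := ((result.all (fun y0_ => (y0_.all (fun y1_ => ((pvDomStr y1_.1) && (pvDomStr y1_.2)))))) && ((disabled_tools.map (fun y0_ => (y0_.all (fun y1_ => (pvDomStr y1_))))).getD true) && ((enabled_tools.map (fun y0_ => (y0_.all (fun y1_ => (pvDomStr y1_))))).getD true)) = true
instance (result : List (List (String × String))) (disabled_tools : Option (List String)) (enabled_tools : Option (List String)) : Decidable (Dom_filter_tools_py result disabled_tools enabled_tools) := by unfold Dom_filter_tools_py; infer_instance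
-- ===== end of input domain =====

-- B replaces A's stateful loop with its per-entry branch chain by set algebra: after an
-- up-front validation it computes one 'allowed' name set and filters by a single
-- membership test. Objective: alternative formulation, same asymptotic cost.

-- ===== PORT A =====
-- literal transliteration of A's loop: one fold carrying (filtered, names_seen)
def filter_tools_py (result : List (List (String × String))) (disabled_tools : Option (List String)) (enabled_tools : Option (List String)) : List (List (String × String)) :=
  let disabled_set : PySem.Set String := PySem.Set.ofList (disabled_tools.getD [])
  let enabled_set : PySem.Set String := PySem.Set.ofList (enabled_tools.getD [])
  let st := result.foldl
    (fun (st : List (List (String × String)) × PySem.Set String) entry =>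
      match (PySem.Dict.mk entry).get? "name" with
      | none => st
      | some name =>
        let names_seen := PySem.Set.add st.2 name
        if PySem.Set.contains disabled_set name then (st.1, names_seen)
        else if !enabled_set.isEmpty && !(PySem.Set.contains enabled_set name) then (st.1, names_seen)
        else (st.1 ++ [entry], names_seen))
    ([], PySem.Set.empty)
  -- the final 'if enabled_set: … raise ValueError' never fires under Pre_filter_tools_py
  st.1

-- ===== PORT B =====
-- transliteration of B: names_seen ({e.get("name") …} - {None} = the some-valued names, exact
-- as a set), then the raising validation branch (excluded by Pre_), then the 'allowed' set
-- ((enabled_set or names_seen) - disabled_set) and one filtering comprehension over it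
def filter_tools_py_alt (result : List (List (String × String))) (disabled_tools : Option (List String)) (enabled_tools : Option (List String)) : List (List (String × String)) :=
  let names_seen : PySem.Set String :=
    PySem.Set.ofList (result.filterMap (fun e => (PySem.Dict.mk e).get? "name"))
  let enabled_set : PySem.Set String := PySem.Set.ofList (enabled_tools.getD [])
  let allowed : PySem.Set String :=
    PySem.Set.diff (if enabled_set.isEmpty then names_seen else enabled_set)
      (PySem.Set.ofList (disabled_tools.getD []))
  result.filter (fun e =>
    match (PySem.Dict.mk e).get? "name" with
    | none => false    -- None is never in allowed
    | some n => PySem.Set.contains allowed n)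

-- ===== PRECONDITION & SPEC =====
-- Pre_ excludes exactly the inputs on which A raises ValueError ('Enabled tools not found'):
-- some enabled tool name is not the "name" of any entry in result (B raises there too).
def Pre_filter_tools_py (result : List (List (String × String))) (disabled_tools : Option (List String)) (enabled_tools : Option (List String)) : Prop :=
  ∀ t ∈ enabled_tools.getD [], ∃ e ∈ result, (PySem.Dict.mk e).get? "name" = some t
instance (result : List (List (String × String))) (disabled_tools : Option (List String)) (enabled_tools : Option (List String)) : Decidable (Pre_filter_tools_py result disabled_tools enabled_tools) := by unfold Pre_filter_tools_py; infer_instance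
def pvWitness_filter_tools_py : (List (List (String × String))) × Option (List String) × Option (List String) :=
  ([[("name", "a")], [("name", "b")], [("x", "y")]], some ["b"], some ["a"])

def Spec_filter_tools_py (result : List (List (String × String))) (disabled_tools : Option (List String)) (enabled_tools : Option (List String)) (out : List (List (String × String))) : Prop := out = filter_tools_py_alt result disabled_tools enabled_tools
instance (result : List (List (String × String))) (disabled_tools : Option (List String)) (enabled_tools : Option (List String)) (out : List (List (String × String))) : Decidable (Spec_filter_tools_py result disabled_tools enabled_tools out) := by unfold Spec_filter_tools_py; infer_instance

-- ===== CLAIM (what is proved, stated in full; the proofs are below) =====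
def Claim_equal_filter_tools_py : Prop := ∀ (result : List (List (String × String))) (disabled_tools : Option (List String)) (enabled_tools : Option (List String)), Dom_filter_tools_py result disabled_tools enabled_tools → Pre_filter_tools_py result disabled_tools enabled_tools → Spec_filter_tools_py result disabled_tools enabled_tools (filter_tools_py result disabled_tools enabled_tools)

-- ===== LEMMAS AND PROOFS =====

-- A's fold, started from any accumulator, appends exactly the filter by A's per-entry
-- condition; names_seen never influences the filtered component.
theorem filter_tools_py_fold_eq (dset eset : PySem.Set String)
    (result : List (List (String × String)))
    (acc : List (List (String × String))) (ns : PySem.Set String) :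
    (result.foldl
      (fun (st : List (List (String × String)) × PySem.Set String) entry =>
        match (PySem.Dict.mk entry).get? "name" with
        | none => st
        | some name =>
          let names_seen := PySem.Set.add st.2 name
          if PySem.Set.contains dset name then (st.1, names_seen)
          else if !eset.isEmpty && !(PySem.Set.contains eset name) then (st.1, names_seen)
          else (st.1 ++ [entry], names_seen))
      (acc, ns)).1
    = acc ++ result.filter (fun e =>
        match (PySem.Dict.mk e).get? "name" with
        | none => false
        | some n => !(PySem.Set.contains dset n)
                    && (eset.isEmpty || PySem.Set.contains eset n)) := by
  induction result generalizing acc ns with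
  | nil => simp
  | cons e rest ih =>
    rw [List.foldl_cons, List.filter_cons]
    cases h : (PySem.Dict.mk e).get? "name" with
    | none =>
      simp only [h]
      exact ih acc ns
    | some n =>
      simp only [h]
      by_cases hd : PySem.Set.contains dset n
      · rw [if_pos hd, ih]
        have hd' : n ∈ dset := by simpa [PySem.Set.contains] using hd
        simp [hd']
      · have hd' : n ∉ dset := by simpa [PySem.Set.contains] using hd
        by_cases he : (!eset.isEmpty && !(PySem.Set.contains eset n)) = true
        · rw [if_neg hd, if_pos he, ih]
          simp only [Bool.and_eq_true, Bool.not_eq_true'] at he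
          have he1 : eset ≠ [] := by simpa [List.isEmpty_iff] using he.1
          have he2 : n ∉ eset := by simpa [PySem.Set.contains] using he.2
          simp [hd', he1, he2]
        · rw [if_neg hd, if_neg he, ih]
          have h1 : eset.isEmpty = true ∨ eset.contains n = true := by
            cases hie : eset.isEmpty
            · cases hce : eset.contains n
              · exact absurd (by rw [hie, hce]; rfl) he
              · exact Or.inr rfl
            · exact Or.inl rfl
          rcases h1 with h1 | h1
          · have h2 : eset = [] := by simpa [List.isEmpty_iff] using h1
            simp [hd', h2]
          · have h2 : n ∈ eset := by simpa [PySem.Set.contains] using h1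
            simp [hd', h2]

-- for an entry of result, A's three-condition test agrees with B's single membership
-- in 'allowed' (when enabled_set is empty, the entry's own name witnesses names_seen)
theorem filter_tools_py_pred_eq (result : List (List (String × String)))
    (disabled_tools enabled_tools : Option (List String))
    (e : List (String × String)) (he : e ∈ result) :
    (match (PySem.Dict.mk e).get? "name" with
      | none => false
      | some n => !(PySem.Set.contains (PySem.Set.ofList (disabled_tools.getD [])) n)
                  && ((PySem.Set.ofList (enabled_tools.getD [])).isEmpty
                      || PySem.Set.contains (PySem.Set.ofList (enabled_tools.getD [])) n))
    = (match (PySem.Dict.mk e).get? "name" with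
      | none => false
      | some n => PySem.Set.contains
          (PySem.Set.diff
            (if (PySem.Set.ofList (enabled_tools.getD [])).isEmpty then
              PySem.Set.ofList (result.filterMap (fun e => (PySem.Dict.mk e).get? "name"))
            else PySem.Set.ofList (enabled_tools.getD []))
            (PySem.Set.ofList (disabled_tools.getD []))) n) := by
  cases h : (PySem.Dict.mk e).get? "name" with
  | none => rfl
  | some n =>
    simp only []
    have hn : n ∈ result.filterMap (fun e => (PySem.Dict.mk e).get? "name") :=
      List.mem_filterMap.mpr ⟨e, he, h⟩
    by_cases hie : (PySem.Set.ofList (enabled_tools.getD [])).isEmpty = true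
    · simp [hie, PySem.Set.contains, PySem.Set.mem_diff, PySem.Set.mem_ofList, hn]
    · simp only [Bool.not_eq_true] at hie
      simp [hie, PySem.Set.contains, PySem.Set.mem_diff, PySem.Set.mem_ofList,
        Bool.and_comm]

-- ===== VERDICT (by name: the statement is the Claim_ definition above) =====
theorem filter_tools_py_spec : Claim_equal_filter_tools_py := by
  intro result disabled_tools enabled_tools _ _
  unfold Spec_filter_tools_py filter_tools_py filter_tools_py_alt
  rw [filter_tools_py_fold_eq]
  simp only [List.nil_append]
  exact List.filter_congr (fun e he =>
    filter_tools_py_pred_eq result disabled_tools enabled_tools e he)
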